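-- pv_equiv track=rewrite | github.com/COMU/kripton | pandigital-prime/pandigital_prime.py | ndigit_pandigitals
-- ===== SOURCE A (Python) =====
-- def ndigit_pandigitals(n):
--   """Yields all n-digit pandigital numbers from high to low
--   """
--
--   def add_numbers(n, lst=[]):
--     """We keep adding numbers recursively wrt pandigital rule.
--     """
--     if len(lst) == n:
--       yield int("".join(map(lambda x: str(x), lst)))
--     else:
--       for i in range(n, 0, -1):
--         if i in lst:
--           continue
--         else:
--           lst.append(i)
--           for c in add_numbers(n, lst):
--             yield c
--           lst.pop()
--
--   for final_number in add_numbers(n):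
--     yield final_number
-- ===== SOURCE B (Python) =====
-- def ndigit_pandigitals(n):
--   """Yields all n-digit pandigital numbers from high to low."""
--   if n < 0:
--     return
--   digits = list(range(n, 0, -1))
--   # breadth-first: grow all prefixes one position at a time, in lexicographic order
--   states = [([], digits)]  # (prefix chosen so far, digits still unused, in order)
--   for _ in range(len(digits)):
--     states = [(prefix + [d], rem[:i] + rem[i + 1:])
--               for prefix, rem in states
--               for i, d in enumerate(rem)]
--   for prefix, _ in states:
--     yield int("".join(map(str, prefix)))
-- ===== Notes on version B (the rewrite author's own statement) =====
-- stated objective: alternative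
-- what changed: Replaces the recursive backtracker that mutates one shared list and rescans it for membership with a non-recursive breadth-first loop that rebuilds the whole frontier of (prefix, remaining-digits) states once per digit position.
-- outside the precondition, e.g. on ndigit_pandigitals(0): A raises ValueError, B raises ValueError
import Mathlib
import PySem

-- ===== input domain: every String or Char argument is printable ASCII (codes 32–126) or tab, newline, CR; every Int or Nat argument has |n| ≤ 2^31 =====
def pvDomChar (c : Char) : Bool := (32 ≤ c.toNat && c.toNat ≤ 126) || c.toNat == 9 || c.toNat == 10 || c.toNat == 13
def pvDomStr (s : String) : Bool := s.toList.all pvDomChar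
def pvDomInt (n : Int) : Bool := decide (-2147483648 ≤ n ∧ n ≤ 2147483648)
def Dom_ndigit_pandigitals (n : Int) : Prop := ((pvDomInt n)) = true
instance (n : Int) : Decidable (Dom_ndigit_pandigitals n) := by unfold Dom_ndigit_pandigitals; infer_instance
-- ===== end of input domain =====

-- B replaces A's recursive, list-mutating backtracker by a non-recursive breadth-first loop over
-- (prefix, remaining-digits) states (objective: alternative). A and B are generators; the lists
-- compared here are the sequences of yielded values.

-- ===== PORT A =====
-- filtering out lst ++ [i] = filtering out lst, then i  (cited by pandAddNumbers' decreasing_by, so stated above the port)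
theorem pandFilterNotMemAppend (l lst : List Int) (i : Int) :
    l.filter (fun y => decide (y ∉ lst ++ [i]))
      = (l.filter (fun y => decide (y ∉ lst))).filter (fun y => decide (y ≠ i)) := by
  rw [List.filter_filter]
  apply List.filter_congr
  intro x _
  by_cases h1 : x ∈ lst <;> by_cases h2 : x = i <;> simp [h1, h2]

-- int("".join(map(str, lst))) — shared by both ports, both Pythons contain this very expression.
-- ofStr? is none exactly on the empty digit list, reached only at n = 0, which Pre_ excludes.
def pandNum (lst : List Int) : Int :=
  (PySem.Int.ofStr? (PySem.Str.join "" (lst.map PySem.Int.toStr))).getD 0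

-- add_numbers(n, lst): yield when len(lst) == n, else try each unused i from range(n, 0, -1)
def pandAddNumbers (n : Int) (lst : List Int) : List Int :=
  if (lst.length : Int) = n then
    [pandNum lst]
  else
    (PySem.List.pyRange n 0 (-1)).attach.flatMap (fun x =>
      if _h : x.1 ∈ lst then [] else pandAddNumbers n (lst ++ [x.1]))
  termination_by ((PySem.List.pyRange n 0 (-1)).filter (fun y => decide (y ∉ lst))).length
  decreasing_by
    rw [pandFilterNotMemAppend]
    refine List.length_filter_lt_length_iff_exists.mpr ⟨x.1, ?_, by simp⟩
    simp only [List.mem_filter, decide_eq_true_iff]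
    exact ⟨x.2, _h⟩

def ndigit_pandigitals (n : Int) : List Int := pandAddNumbers n []

-- ===== PORT B =====
-- one comprehension pass: every state grows by one chosen digit, in order of its position
def pandStep (states : List (List Int × List Int)) : List (List Int × List Int) :=
  states.flatMap (fun pr =>
    (PySem.List.enumerate pr.2 0).map (fun id =>
      (pr.1 ++ [id.2],
       PySem.List.slice pr.2 none (some id.1) ++ PySem.List.slice pr.2 (some (id.1 + 1)) none)))

def ndigit_pandigitals_alt (n : Int) : List Int :=
  if n < 0 then []
  else
    let digits := PySem.List.pyRange n 0 (-1)
    let states := (PySem.List.pyRange 0 (digits.length : Int) 1).foldl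
      (fun st _ => pandStep st) [(([] : List Int), digits)]
    states.map (fun pr => pandNum pr.1)

-- ===== PRECONDITION & SPEC =====
-- Pre_ excludes only n = 0, where both A and B raise ValueError (int("") on the empty digit tuple).
def Pre_ndigit_pandigitals (n : Int) : Prop := n ≠ 0
instance (n : Int) : Decidable (Pre_ndigit_pandigitals n) := by unfold Pre_ndigit_pandigitals; infer_instance
def pvWitness_ndigit_pandigitals : Int := 3

def Spec_ndigit_pandigitals (n : Int) (out : List Int) : Prop := out = ndigit_pandigitals_alt n
instance (n : Int) (out : List Int) : Decidable (Spec_ndigit_pandigitals n out) := by unfold Spec_ndigit_pandigitals; infer_instance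

-- ===== CLAIM (what is proved, stated in full; the proofs are below) =====
def Claim_equal_ndigit_pandigitals : Prop := ∀ (n : Int), Dom_ndigit_pandigitals n → Pre_ndigit_pandigitals n → Spec_ndigit_pandigitals n (ndigit_pandigitals n)

-- ===== LEMMAS AND PROOFS =====

-- Common reference: permutations of xs in first-position order (itertools order), with fuel = length.
def pandPick : List Int → List (Int × List Int)
  | [] => []
  | x :: xs => (x, xs) :: (pandPick xs).map (fun p => (p.1, x :: p.2))

def pandPerms : Nat → List Int → List (List Int)
  | 0, _ => [[]]
  | k + 1, xs => (pandPick xs).flatMap (fun p => (pandPerms k p.2).map (fun q => p.1 :: q))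

def pandIter : Nat → List (List Int × List Int) → List (List Int × List Int)
  | 0, S => S
  | k + 1, S => pandIter k (pandStep S)

theorem pandPick_length (l : List Int) : (pandPick l).length = l.length := by
  induction l with
  | nil => rfl
  | cons x xs ih => simp [pandPick, ih]

theorem pandPick_getElem (l : List Int) (k : Nat) (h : k < (pandPick l).length) :
    (pandPick l)[k] = (l[k]'(by rwa [← pandPick_length]),
      l.take k ++ l.drop (k + 1)) := by
  induction l generalizing k with
  | nil => simp [pandPick] at h
  | cons x xs ih =>
    cases k with
    | zero => simp [pandPick]
    | succ k =>
      have hk : k < (pandPick xs).length := by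
        simpa [pandPick] using h
      simp [pandPick, ih k hk]

theorem pandPick_snd_length (l : List Int) : ∀ p ∈ pandPick l, p.2.length + 1 = l.length := by
  induction l with
  | nil => simp [pandPick]
  | cons x xs ih =>
    intro p hp
    simp only [pandPick, List.mem_cons, List.mem_map] at hp
    rcases hp with rfl | ⟨q, hq, rfl⟩
    · simp
    · simpa using ih q hq

theorem pandStep_singleton (pre rem : List Int) :
    pandStep [(pre, rem)] = (pandPick rem).map (fun p => (pre ++ [p.1], p.2)) := by
  apply List.ext_getElem
  · simp [pandStep, PySem.List.length_enumerate, pandPick_length]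
  · intro k h1 h2
    have hk : k < rem.length := by
      simpa [pandStep, PySem.List.length_enumerate] using h1
    have hk' : k < (pandPick rem).length := by rwa [pandPick_length]
    simp only [pandStep, List.flatMap_cons, List.flatMap_nil, List.append_nil,
      List.getElem_map, PySem.List.getElem_enumerate, pandPick_getElem rem k hk']
    congr 1
    have h1 : PySem.List.slice rem none (some ((0 : Int) + (k : Int))) = rem.take k := by
      rw [zero_add, PySem.List.slice_to _ (by positivity)]
      simp
    have h2 : PySem.List.slice rem (some ((0 : Int) + (k : Int) + 1)) none = rem.drop (k + 1) := by
      have : (0 : Int) + (k : Int) + 1 = ((k + 1 : Nat) : Int) := by push_cast; ring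
      rw [this, PySem.List.slice_from _ (by positivity)]
      simp
    rw [h1, h2]

theorem pandStep_append (S T : List (List Int × List Int)) :
    pandStep (S ++ T) = pandStep S ++ pandStep T := by
  simp [pandStep]

theorem pandIter_append (k : Nat) (S T : List (List Int × List Int)) :
    pandIter k (S ++ T) = pandIter k S ++ pandIter k T := by
  induction k generalizing S T with
  | zero => rfl
  | succ k ih => simp [pandIter, pandStep_append, ih]

theorem pandIter_nil (k : Nat) : pandIter k [] = [] := by
  induction k with
  | zero => rfl
  | succ k ih => simpa [pandIter, pandStep] using ih

theorem pandIter_map {α : Type} (k : Nat) (L : List α) (f : α → List Int × List Int) :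
    pandIter k (L.map f) = L.flatMap (fun a => pandIter k [f a]) := by
  induction L with
  | nil => simp [pandIter_nil]
  | cons a L ih =>
    have : (f a :: L.map f) = [f a] ++ L.map f := rfl
    rw [List.map_cons, this, pandIter_append, ih]
    rfl

theorem pandIter_singleton (k : Nat) (rem pre : List Int) (h : rem.length = k) :
    pandIter k [(pre, rem)]
      = (pandPerms k rem).map (fun p => (pre ++ p, ([] : List Int))) := by
  induction k generalizing rem pre with
  | zero =>
    rw [List.length_eq_zero_iff] at h
    subst h
    simp [pandIter, pandPerms]
  | succ k ih =>
    show pandIter k (pandStep [(pre, rem)]) = _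
    rw [pandStep_singleton, pandIter_map]
    have step : ∀ p ∈ pandPick rem,
        pandIter k [(pre ++ [p.1], p.2)]
          = (pandPerms k p.2).map (fun q => (pre ++ [p.1] ++ q, ([] : List Int))) := by
      intro p hp
      exact ih p.2 (pre ++ [p.1]) (by have := pandPick_snd_length rem p hp; omega)
    rw [List.flatMap_congr step]
    simp only [pandPerms, List.map_flatMap]
    apply List.flatMap_congr
    intro p _
    rw [List.map_map]
    apply List.map_congr_left
    intro q _
    simp

theorem pandFoldl_const (l : List Int) (S : List (List Int × List Int)) :
    l.foldl (fun s _ => pandStep s) S = pandIter l.length S := by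
  induction l generalizing S with
  | nil => rfl
  | cons a l ih => simp [List.foldl_cons, ih]; rfl

theorem pandPick_nodup (l : List Int) (h : l.Nodup) :
    pandPick l = l.map (fun i => (i, l.filter (fun y => decide (y ≠ i)))) := by
  induction l with
  | nil => rfl
  | cons x xs ih =>
    rcases List.nodup_cons.mp h with ⟨hx, hxs⟩
    rw [pandPick, ih hxs, List.map_map, List.map_cons]
    congr 1
    · have hfx : List.filter (fun y => decide (y ≠ x)) (x :: xs) = xs := by
        rw [List.filter_cons_of_neg (by simp)]
        apply List.filter_eq_self.mpr
        intro a ha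
        simp only [decide_eq_true_eq]
        intro hax
        exact hx (hax ▸ ha)
      rw [hfx]
    · apply List.map_congr_left
      intro i hi
      have hxi : x ≠ i := fun hxi => hx (hxi ▸ hi)
      simp [hxi]

theorem pandDigits_nodup (n : Int) : (PySem.List.pyRange n 0 (-1)).Nodup := by
  rw [PySem.List.pyRange_neg_one]
  exact (List.nodup_range).map (fun a b hab => by omega)

-- lst.Nodup ∧ lst ⊆ digits ⇒ |lst| + |digits \ lst| = |digits|
theorem pandLength_split (digits lst : List Int) (hd : digits.Nodup) (hl : lst.Nodup)
    (hsub : ∀ x ∈ lst, x ∈ digits) :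
    lst.length + (digits.filter (fun y => decide (y ∉ lst))).length = digits.length := by
  have hperm : (digits.filter (fun y => decide (y ∈ lst))).Perm lst := by
    refine (List.perm_ext_iff_of_nodup (hd.filter _) hl).mpr ?_
    intro a
    simp only [List.mem_filter, decide_eq_true_iff]
    exact ⟨fun ⟨_, h2⟩ => h2, fun h => ⟨hsub a h, h⟩⟩
  calc lst.length + (digits.filter (fun y => decide (y ∉ lst))).length
      = (digits.filter (fun y => decide (y ∈ lst))).length
          + (digits.filter (fun y => decide (y ∉ lst))).length := by rw [hperm.length_eq]
    _ = digits.length := by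
        simp only [decide_not]
        exact (List.length_eq_length_filter_add _).symm

theorem pandAttach_flatMap (l lst : List Int) (f : Int → List Int) :
    (l.attach.flatMap (fun x => if _h : x.1 ∈ lst then [] else f x.1))
      = (l.filter (fun y => decide (y ∉ lst))).flatMap f := by
  have h1 : (l.attach.flatMap (fun x => if _h : x.1 ∈ lst then [] else f x.1))
      = l.flatMap (fun i => if i ∈ lst then [] else f i) := by
    conv_rhs => rw [← List.attach_map_subtype_val l]
    rw [List.flatMap_map]
    apply List.flatMap_congr
    intro x _
    split <;> simp_all
  rw [h1]
  induction l with
  | nil => rfl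
  | cons a l ih =>
    by_cases ha : a ∈ lst <;> simp [ha, ih]

-- A's backtracker computes the mapped permutation list
theorem pandAdd_eq_perms (n : Int) (hn : 1 ≤ n) :
    ∀ (m : Nat) (lst : List Int), lst.Nodup →
      (∀ x ∈ lst, x ∈ PySem.List.pyRange n 0 (-1)) →
      ((PySem.List.pyRange n 0 (-1)).filter (fun y => decide (y ∉ lst))).length = m →
      pandAddNumbers n lst
        = (pandPerms m ((PySem.List.pyRange n 0 (-1)).filter (fun y => decide (y ∉ lst)))).map
            (fun p => pandNum (lst ++ p)) := by
  intro m
  induction m using Nat.strong_induction_on with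
  | _ m ih =>
    intro lst hnd hsub hlen
    have hdigits := pandDigits_nodup n
    have hdiglen : (PySem.List.pyRange n 0 (-1)).length = n.toNat := by
      rw [PySem.List.length_pyRange_neg_one]; congr 1; omega
    have hsplit := pandLength_split _ lst hdigits hnd hsub
    cases m with
    | zero =>
      have hrem : (PySem.List.pyRange n 0 (-1)).filter (fun y => decide (y ∉ lst)) = [] :=
        List.length_eq_zero_iff.mp hlen
      have hll : lst.length = n.toNat := by
        rw [hrem] at hsplit; simpa [hdiglen] using hsplit
      rw [pandAddNumbers]
      rw [if_pos (by rw [hll]; omega), hrem]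
      simp [pandPerms]
    | succ m =>
      have hlt : (lst.length : Int) ≠ n := by
        rw [hlen] at hsplit
        have : lst.length + (m + 1) = n.toNat := by omega
        omega
      rw [pandAddNumbers, if_neg hlt,
        pandAttach_flatMap (PySem.List.pyRange n 0 (-1)) lst (fun i => pandAddNumbers n (lst ++ [i]))]
      set rem := (PySem.List.pyRange n 0 (-1)).filter (fun y => decide (y ∉ lst)) with hremdef
      have hremnd : rem.Nodup := hdigits.filter _
      have hstep : ∀ i ∈ rem,
          pandAddNumbers n (lst ++ [i])
            = (pandPerms m (rem.filter (fun y => decide (y ≠ i)))).map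
                (fun p => pandNum (lst ++ [i] ++ p)) := by
        intro i hi
        have himem : i ∈ PySem.List.pyRange n 0 (-1) ∧ i ∉ lst := by
          have := List.mem_filter.mp hi; simpa using this
        have hnd' : (lst ++ [i]).Nodup := by
          simp only [List.nodup_append, List.nodup_singleton, true_and, hnd]
          intro a ha b hb
          simp only [List.mem_singleton] at hb
          subst hb
          intro hai
          exact himem.2 (hai ▸ ha)
        have hsub' : ∀ x ∈ lst ++ [i], x ∈ PySem.List.pyRange n 0 (-1) := by
          intro x hx
          rcases List.mem_append.mp hx with hx | hx
          · exact hsub x hx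
          · simp at hx; subst hx; exact himem.1
        have hrem' : (PySem.List.pyRange n 0 (-1)).filter (fun y => decide (y ∉ lst ++ [i]))
            = rem.filter (fun y => decide (y ≠ i)) := by
          rw [pandFilterNotMemAppend]
        have herase : rem.filter (fun y => decide (y ≠ i)) = rem.erase i := by
          rw [hremnd.erase_eq_filter]
          apply List.filter_congr
          intro x _
          by_cases hxi : x = i <;> simp [hxi]
        have hlen' : ((PySem.List.pyRange n 0 (-1)).filter (fun y => decide (y ∉ lst ++ [i]))).length = m := by
          rw [hrem', herase, List.length_erase_of_mem hi]
          omega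
        have := ih m (Nat.lt_succ_self m) (lst ++ [i]) hnd' hsub' hlen'
        rw [this, hrem']
      rw [List.flatMap_congr hstep]
      have hpick := pandPick_nodup rem hremnd
      show _ = ((pandPerms (m + 1) rem).map (fun p => pandNum (lst ++ p)))
      rw [pandPerms, hpick, List.flatMap_map, List.map_flatMap]
      apply List.flatMap_congr
      intro i _
      rw [List.map_map]
      apply List.map_congr_left
      intro q _
      simp

-- ===== VERDICT (by name: the statement is the Claim_ definition above) =====
theorem ndigit_pandigitals_spec : Claim_equal_ndigit_pandigitals := by
  intro n _ hpre
  unfold Spec_ndigit_pandigitals ndigit_pandigitals ndigit_pandigitals_alt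
  rcases lt_or_gt_of_ne hpre with hneg | hpos
  · -- n < 0: both sides are empty
    rw [pandAddNumbers, if_neg (by omega), if_pos hneg]
    rw [PySem.List.pyRange_neg_one_eq_nil (by omega)]
    rfl
  · -- n ≥ 1
    have hn : 1 ≤ n := hpos
    rw [if_neg (by omega)]
    have hfull : (PySem.List.pyRange n 0 (-1)).filter (fun y => decide (y ∉ ([] : List Int)))
        = PySem.List.pyRange n 0 (-1) := by
      apply List.filter_eq_self.mpr; intro a _; simp
    have hA := pandAdd_eq_perms n hn (PySem.List.pyRange n 0 (-1)).length []
      List.nodup_nil (by simp) (by rw [hfull])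
    rw [hfull] at hA
    rw [hA]
    have hlen : (PySem.List.pyRange 0 ((PySem.List.pyRange n 0 (-1)).length : Int) 1).length
        = (PySem.List.pyRange n 0 (-1)).length := by
      rw [PySem.List.length_pyRange_one]; omega
    show _ = ((PySem.List.pyRange 0 ((PySem.List.pyRange n 0 (-1)).length : Int) 1).foldl
        (fun st _ => pandStep st) [(([] : List Int), PySem.List.pyRange n 0 (-1))]).map
        (fun pr => pandNum pr.1)
    rw [pandFoldl_const, hlen, pandIter_singleton _ _ _ rfl]
    simp
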